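-- pv_equiv track=rewrite | github.com/med-iv/PythonIntro2020 | 03_Sequences_and_for/hidden_text.py | check
-- ===== SOURCE A (Python) =====
-- def primes(n):
--     pr = []
--     lp = [0 for i in range(n + 1)]
--     for i in range(2, n + 1):
--         if lp[i] == 0:
--             lp[i] = i
--             pr.append(i)
--         j = 0
--         while j < len(pr) and pr[j] <= lp[i] and i * pr[j] <= n:
--             lp[i * pr[j]] = pr[j]
--             j += 1
--     pr.insert(0, 1)
--     return pr
--
-- def check(source, sub_str):
--     if (sub_str == ""):
--         return True
--     if len(source) == 1:
--         return source == sub_str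
--
--     sieve = primes(len(source) // 2)
--     for elem in sieve:
--         for j in range(elem, len(source)):
--             if sub_str in source[(elem - 1)::j]:
--                 return True
--     return False
-- ===== SOURCE B (Python) =====
-- def primes(n):
--     return [1] + [i for i in range(2, n + 1)
--                   if all(i % d for d in range(2, i))]
--
-- def check(source, sub_str):
--     if (sub_str == ""):
--         return True
--     if len(source) == 1:
--         return source == sub_str
--
--     n = len(source)
--     starts = primes(n // 2)
--     return any(sub_str in source[(e - 1)::j]
--                for j in range(1, n) for e in starts if e <= j)
-- ===== Notes on version B (the rewrite author's own statement) =====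
-- stated objective: alternative
-- what changed: A's linear (smallest-prime-factor) sieve is replaced by straightforward trial-division primality, and check's double loop is inverted to iterate strides j first and sieve starts e <= j second.
import Mathlib
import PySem

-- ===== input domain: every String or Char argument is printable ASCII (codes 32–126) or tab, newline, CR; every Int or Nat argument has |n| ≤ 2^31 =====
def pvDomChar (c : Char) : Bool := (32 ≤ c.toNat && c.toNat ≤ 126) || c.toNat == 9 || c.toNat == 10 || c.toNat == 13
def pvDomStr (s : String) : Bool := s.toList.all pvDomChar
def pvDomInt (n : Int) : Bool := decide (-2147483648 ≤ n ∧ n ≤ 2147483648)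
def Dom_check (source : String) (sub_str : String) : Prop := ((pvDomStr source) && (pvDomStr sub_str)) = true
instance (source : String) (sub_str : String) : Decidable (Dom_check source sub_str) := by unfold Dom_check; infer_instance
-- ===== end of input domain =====

-- B replaces A's linear (smallest-prime-factor) sieve by trial-division primes and
-- iterates strides j before starts e; same return value, objective: alternative/simpler.

-- ===== PORT A =====
-- `sub_str in source[(e-1)::j]` (shared shape; each port has its own copy)
def pvHitA (src sub : List Char) (e j : Nat) : Bool :=
  match PySem.Chars.slice? src (some ((e : Int) - 1)) none (j : Int) with
  | some t => PySem.Chars.isIn sub t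
  | none => false

-- the `while j < len(pr) and pr[j] <= lp[i] and i * pr[j] <= n` loop of `primes`
def pvInnerA (n i : Nat) (pr : List Nat) (lp : List Nat) (j : Nat) : List Nat :=
  if h : j < pr.length ∧ pr[j]! ≤ lp[i]! ∧ i * pr[j]! ≤ n then
    pvInnerA n i pr (lp.set (i * pr[j]!) pr[j]!) (j + 1)
  else lp
termination_by pr.length - j
decreasing_by omega

-- one iteration of `for i in range(2, n + 1)` in `primes`, state (lp, pr)
def pvStepA (n : Nat) (st : List Nat × List Nat) (i : Nat) : List Nat × List Nat :=
  let (lp, pr) := if st.1[i]! = 0 then (st.1.set i i, st.2 ++ [i]) else (st.1, st.2)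
  (pvInnerA n i pr lp 0, pr)

def pvPrimesA (n : Nat) : List Nat :=
  1 :: ((List.range' 2 (n + 1 - 2)).foldl (pvStepA n) (List.replicate (n + 1) 0, [])).2

def check (source : String) (sub_str : String) : Bool :=
  if sub_str == "" then true
  else if source.toList.length == 1 then source == sub_str
  else
    (pvPrimesA (source.toList.length / 2)).any fun e =>
      (List.range' e (source.toList.length - e)).any fun j =>
        pvHitA source.toList sub_str.toList e j

-- ===== PORT B =====
def pvHitB (src sub : List Char) (e j : Nat) : Bool :=
  match PySem.Chars.slice? src (some ((e : Int) - 1)) none (j : Int) with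
  | some t => PySem.Chars.isIn sub t
  | none => false

-- `[1] + [i for i in range(2, n+1) if all(i % d for d in range(2, i))]`
def pvPrimesB (n : Nat) : List Nat :=
  1 :: (List.range' 2 (n + 1 - 2)).filter fun i =>
    (List.range' 2 (i - 2)).all fun d => i % d != 0

def check_alt (source : String) (sub_str : String) : Bool :=
  if sub_str == "" then true
  else if source.toList.length == 1 then source == sub_str
  else
    (List.range' 1 (source.toList.length - 1)).any fun j =>
      (pvPrimesB (source.toList.length / 2)).any fun e =>
        decide (e ≤ j) && pvHitB source.toList sub_str.toList e j

-- ===== PRECONDITION & SPEC =====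
def Spec_check (source : String) (sub_str : String) (out : Bool) : Prop := out = check_alt source sub_str
instance (source : String) (sub_str : String) (out : Bool) : Decidable (Spec_check source sub_str out) := by unfold Spec_check; infer_instance

-- ===== CLAIM (what is proved, stated in full; the proofs are below) =====
def Claim_equal_check : Prop := ∀ (source : String) (sub_str : String), Dom_check source sub_str → Spec_check source sub_str (check source sub_str)

-- ===== LEMMAS AND PROOFS =====

-- the step index at which A's sieve assigns lp[k]: k itself if k is prime, else k / spf(k)
def pvTrigger (k : Nat) : Nat := if Nat.Prime k then k else k / k.minFac

-- invariant of the outer loop of A's `primes` after processing i = 2 .. i0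
def pvGood (n i0 : Nat) (st : List Nat × List Nat) : Prop :=
  st.1.length = n + 1 ∧
  st.2 = (List.range' 2 (i0 - 1)).filter (fun m => decide (Nat.Prime m)) ∧
  ∀ k, k ≤ n → st.1[k]! = if 2 ≤ k ∧ pvTrigger k ≤ i0 then k.minFac else 0

theorem pvComposite_facts (k : Nat) (hk : 2 ≤ k) (hnp : ¬ Nat.Prime k) :
    2 ≤ k / k.minFac ∧ k / k.minFac * k.minFac = k ∧ 2 ≤ k.minFac ∧ k / k.minFac < k := by
  have hp : Nat.Prime k.minFac := Nat.minFac_prime (by omega)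
  have hd : k.minFac ∣ k := Nat.minFac_dvd k
  have h2 : 2 ≤ k.minFac := hp.two_le
  have hmul : k / k.minFac * k.minFac = k := Nat.div_mul_cancel hd
  have hpos : 0 < k / k.minFac := Nat.div_pos (Nat.minFac_le (by omega)) (by omega)
  have hne1 : k / k.minFac ≠ 1 := by
    intro h; rw [h, one_mul] at hmul; exact hnp (hmul ▸ hp)
  have hlt : k / k.minFac < k := by
    have : k / k.minFac ≤ k / 2 := Nat.div_le_div_left h2 (by omega)
    omega
  exact ⟨by omega, hmul, h2, hlt⟩

theorem pvTrigger_ge_two (k : Nat) (hk : 2 ≤ k) : 2 ≤ pvTrigger k := by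
  unfold pvTrigger
  split_ifs with hp
  · omega
  · exact (pvComposite_facts k hk hp).1

theorem pvGood_init (n : Nat) : pvGood n 1 (List.replicate (n + 1) 0, []) := by
  refine ⟨by simp, by simp, ?_⟩
  intro k hk
  have : (List.replicate (n + 1) (0 : Nat))[k]! = 0 := by simp [hk]
  rw [this]
  split_ifs with h
  · exact absurd (pvTrigger_ge_two k h.1) (by omega)
  · rfl

theorem pvTakeWhile_eq_filter {p : Nat → Bool} :
    ∀ (l : List Nat), l.Pairwise (· ≤ ·) → (∀ a b, a ≤ b → p b = true → p a = true) →
      l.takeWhile p = l.filter p := by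
  intro l
  induction l with
  | nil => intro _ _; rfl
  | cons a t ih =>
    intro hpw hmono
    rcases List.pairwise_cons.1 hpw with ⟨hab, ht⟩
    by_cases hpa : p a = true
    · rw [List.takeWhile_cons_of_pos hpa, List.filter_cons_of_pos hpa, ih ht hmono]
    · rw [List.takeWhile_cons_of_neg (by simp [hpa]), List.filter_cons_of_neg (by simp [hpa])]
      symm
      rw [List.filter_eq_nil_iff]
      intro b hb hpb
      exact hpa (hmono a b (hab b hb) hpb)

theorem pvFoldlSet_length (i : Nat) :
    ∀ (ps : List Nat) (lp : List Nat),
      (ps.foldl (fun l p => l.set (i * p) p) lp).length = lp.length := by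
  intro ps
  induction ps with
  | nil => intro lp; rfl
  | cons p t ih => intro lp; rw [List.foldl_cons, ih, List.length_set]

theorem pvFoldlSet_getElem! (i : Nat) (hi : 1 ≤ i) :
    ∀ (ps : List Nat) (lp : List Nat) (k : Nat),
      (∀ p ∈ ps, i * p < lp.length) →
      (ps.foldl (fun l p => l.set (i * p) p) lp)[k]! =
        if i * (k / i) = k ∧ k / i ∈ ps then k / i else lp[k]! := by
  intro ps
  induction ps with
  | nil => intro lp k _; simp
  | cons p t ih =>
    intro lp k hlen
    rw [List.foldl_cons, ih _ k (fun q hq => by rw [List.length_set]; exact hlen q (List.mem_cons_of_mem p hq))]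
    by_cases hmem : k / i ∈ t
    · by_cases heq : i * (k / i) = k
      · simp [hmem, heq]
      · simp only [heq, false_and, if_false]
        have hne : i * p ≠ k := by
          intro h
          have : k / i = p := by rw [← h]; exact Nat.mul_div_cancel_left p (by omega)
          exact heq (by rw [this, h])
        rw [List.getElem!_eq_getElem?_getD, List.getElem?_set_ne hne, ← List.getElem!_eq_getElem?_getD]
    · by_cases heq : k = i * p
      · subst heq
        have hkp : i * p / i = p := Nat.mul_div_cancel_left p (by omega)
        have hip : i * p < lp.length := hlen p (List.mem_cons_self)
        rw [if_neg (fun h => hmem h.2)]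
        rw [List.getElem!_eq_getElem?_getD, List.getElem?_set_self hip, Option.getD_some]
        rw [if_pos ⟨by rw [hkp], by rw [hkp]; exact List.mem_cons_self⟩, hkp]
      · have hcond : ¬ (i * (k / i) = k ∧ (k / i = p ∨ k / i ∈ t)) := by
          rintro ⟨h1, h2 | h3⟩
          · exact heq (by rw [← h1, h2])
          · exact hmem h3
        rw [if_neg (by rintro ⟨h1, h2⟩; exact hcond ⟨h1, Or.inr h2⟩),
            if_neg (by rintro ⟨h1, h2⟩; exact hcond ⟨h1, List.mem_cons.1 h2⟩)]
        rw [List.getElem!_eq_getElem?_getD, List.getElem?_set_ne (by omega : i * p ≠ k), ← List.getElem!_eq_getElem?_getD]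

theorem pvInnerA_eq (n i : Nat) (hi2 : 2 ≤ i) (pr : List Nat) (hpr : ∀ p ∈ pr, 2 ≤ p) :
    ∀ (fuel j : Nat) (lp : List Nat), pr.length - j ≤ fuel →
      pvInnerA n i pr lp j =
        ((pr.drop j).takeWhile fun p => decide (p ≤ lp[i]! ∧ i * p ≤ n)).foldl
          (fun l p => l.set (i * p) p) lp := by
  intro fuel
  induction fuel with
  | zero =>
    intro j lp hf
    have hj : pr.length ≤ j := by omega
    rw [pvInnerA, dif_neg (by omega), List.drop_eq_nil_of_le hj]
    rfl
  | succ f ihf =>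
    intro j lp hf
    rw [pvInnerA]
    by_cases hcond : j < pr.length ∧ pr[j]! ≤ lp[i]! ∧ i * pr[j]! ≤ n
    · rw [dif_pos hcond]
      obtain ⟨hj, hle, hn⟩ := hcond
      have hdrop : pr.drop j = pr[j] :: pr.drop (j + 1) := List.drop_eq_getElem_cons hj
      have hbang : pr[j]! = pr[j] := by
        rw [List.getElem!_eq_getElem?_getD, List.getElem?_eq_getElem hj, Option.getD_some]
      have hp2 : 2 ≤ pr[j] := hpr _ (List.getElem_mem hj)
      have hset : (lp.set (i * pr[j]!) pr[j]!)[i]! = lp[i]! := by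
        rw [List.getElem!_eq_getElem?_getD, List.getElem?_set_ne (by rw [hbang]; nlinarith),
            ← List.getElem!_eq_getElem?_getD]
      rw [ihf (j + 1) _ (by omega), hset, hdrop,
          List.takeWhile_cons_of_pos (by simp only [decide_eq_true_eq]; rw [← hbang]; exact ⟨hle, hn⟩),
          List.foldl_cons, hbang]
    · rw [dif_neg hcond]
      rcases Nat.lt_or_ge j pr.length with hj | hj
      · have hdrop : pr.drop j = pr[j] :: pr.drop (j + 1) := List.drop_eq_getElem_cons hj
        have hbang : pr[j]! = pr[j] := by
          rw [List.getElem!_eq_getElem?_getD, List.getElem?_eq_getElem hj, Option.getD_some]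
        have hng : ¬ (pr[j] ≤ lp[i]! ∧ i * pr[j] ≤ n) := by rw [← hbang]; tauto
        rw [hdrop, List.takeWhile_cons_of_neg (by simp only [decide_eq_true_eq]; exact hng)]
        rfl
      · rw [List.drop_eq_nil_of_le hj]; rfl

theorem pvStepA_key (n i : Nat) (h2 : 2 ≤ i) (hin : i ≤ n) (lpb prb : List Nat)
    (hL : lpb.length = n + 1)
    (hP : prb = (List.range' 2 (i - 1)).filter (fun m => decide (Nat.Prime m)))
    (hI : lpb[i]! = i.minFac)
    (hK : ∀ k, k ≤ n → lpb[k]! = if 2 ≤ k ∧ (pvTrigger k ≤ i - 1 ∨ k = i) then k.minFac else 0) :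
    pvGood n i (pvInnerA n i prb lpb 0, prb) := by
  have hMi2 : 2 ≤ i.minFac := (Nat.minFac_prime (by omega : i ≠ 1)).two_le
  have hMile : i.minFac ≤ i := Nat.minFac_le (by omega)
  have hprb2 : ∀ p ∈ prb, 2 ≤ p := by
    rw [hP]; intro p hp
    exact (List.mem_range'_1.1 (List.mem_filter.1 hp).1).1
  have hmemP : ∀ p, p ∈ prb ↔ Nat.Prime p ∧ 2 ≤ p ∧ p ≤ i := by
    intro p
    rw [hP]
    simp only [List.mem_filter, List.mem_range'_1, decide_eq_true_eq]
    constructor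
    · rintro ⟨⟨hp2, hplt⟩, hpp⟩; exact ⟨hpp, hp2, by omega⟩
    · rintro ⟨hpp, hp2, hpi⟩; exact ⟨⟨hp2, by omega⟩, hpp⟩
  rw [pvInnerA_eq n i h2 prb hprb2 prb.length 0 lpb (by omega), List.drop_zero, hI,
      pvTakeWhile_eq_filter prb
        (by
          rw [hP]
          exact ((List.pairwise_lt_range' (s := 2) (n := i - 1)).imp le_of_lt).filter _)
        (by
          intro a b hab hb
          simp only [decide_eq_true_eq] at *
          exact ⟨le_trans hab hb.1, le_trans (Nat.mul_le_mul_left i hab) hb.2⟩)]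
  set S := prb.filter (fun p => decide (p ≤ i.minFac ∧ i * p ≤ n)) with hS
  have hmemS : ∀ p, p ∈ S ↔ Nat.Prime p ∧ 2 ≤ p ∧ p ≤ i ∧ p ≤ i.minFac ∧ i * p ≤ n := by
    intro p
    rw [hS, List.mem_filter, hmemP p]
    simp only [decide_eq_true_eq]
    tauto
  have hSlen : ∀ p ∈ S, i * p < lpb.length := by
    intro p hp
    have := ((hmemS p).1 hp).2.2.2.2
    omega
  refine ⟨by rw [pvFoldlSet_length]; exact hL, hP, ?_⟩
  intro k hk
  rw [pvFoldlSet_getElem! i (by omega) S lpb k hSlen]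
  by_cases hw : i * (k / i) = k ∧ k / i ∈ S
  · rw [if_pos hw]
    obtain ⟨hwk, hwS⟩ := hw
    generalize hpdef : k / i = p at hwk hwS ⊢
    obtain ⟨hpp, hp2, hpi, hpmf, hpn⟩ := (hmemS p).1 hwS
    have hk4 : 2 ≤ k := by
      have : 2 * 2 ≤ i * p := Nat.mul_le_mul h2 hp2
      omega
    have hpd : p ∣ k := ⟨i, by rw [← hwk, Nat.mul_comm]⟩
    have hkne1 : k ≠ 1 := by omega
    have hmfk_le : k.minFac ≤ p := Nat.minFac_le_of_dvd hp2 hpd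
    have hle_mfk : p ≤ k.minFac := by
      have hmfp : Nat.Prime k.minFac := Nat.minFac_prime hkne1
      have hdvd : k.minFac ∣ i * p := by rw [hwk]; exact Nat.minFac_dvd k
      rcases (Nat.Prime.dvd_mul hmfp).1 hdvd with h | h
      · have : i.minFac ≤ k.minFac := Nat.minFac_le_of_dvd hmfp.two_le h
        omega
      · rcases hpp.eq_one_or_self_of_dvd _ h with h1 | h1
        · exact absurd h1 (Nat.Prime.ne_one hmfp)
        · omega
    have hmfk : k.minFac = p := by omega
    have hnp : ¬ Nat.Prime k := by
      intro hkp
      have hlt : p < k := by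
        have : 2 * p ≤ i * p := Nat.mul_le_mul_right _ h2
        omega
      have := (Nat.prime_def_lt.1 hkp).2 p hlt hpd
      omega
    have htrig : pvTrigger k = i := by
      unfold pvTrigger
      rw [if_neg hnp, hmfk, ← hwk, Nat.mul_div_cancel _ (by omega : 0 < p)]
    rw [if_pos ⟨hk4, by omega⟩, hmfk]
  · rw [if_neg hw, hK k hk]
    by_cases hki : k = i
    · subst hki
      have htle : pvTrigger k ≤ k := by
        unfold pvTrigger
        split_ifs with hp
        · exact le_refl k
        · exact le_of_lt (pvComposite_facts k h2 hp).2.2.2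
      rw [if_pos ⟨h2, Or.inr rfl⟩, if_pos ⟨h2, htle⟩]
    · have hiff : (2 ≤ k ∧ (pvTrigger k ≤ i - 1 ∨ k = i)) ↔ (2 ≤ k ∧ pvTrigger k ≤ i) := by
        constructor
        · rintro ⟨hk2, h | h⟩
          · exact ⟨hk2, by omega⟩
          · exact absurd h hki
        · rintro ⟨hk2, htr⟩
          refine ⟨hk2, ?_⟩
          rcases Nat.lt_or_ge (pvTrigger k) i with hlt | hge
          · exact Or.inl (by omega)
          · have htr_eq : pvTrigger k = i := by omega
            by_cases hkp : Nat.Prime k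
            · exact absurd (by unfold pvTrigger at htr_eq; rw [if_pos hkp] at htr_eq; exact htr_eq) hki
            · exfalso
              obtain ⟨hq2, hqmul, hmf2, hqlt⟩ := pvComposite_facts k hk2 hkp
              have htr' : k / k.minFac = i := by
                unfold pvTrigger at htr_eq; rw [if_neg hkp] at htr_eq; exact htr_eq
              have hkimf : i * k.minFac = k := by rw [← htr']; exact Nat.mul_comm _ _ ▸ hqmul
              have hkdi : k / i = k.minFac := by
                conv_lhs => rw [← hkimf]
                exact Nat.mul_div_cancel_left _ (by omega)
              apply hw
              refine ⟨by rw [hkdi, hkimf], ?_⟩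
              rw [hkdi, hmemS]
              have hmfp : Nat.Prime k.minFac := Nat.minFac_prime (by omega)
              have hidvdk : i ∣ k := ⟨k.minFac, hkimf.symm⟩
              have hmfle : k.minFac ≤ i.minFac :=
                Nat.minFac_le_of_dvd hMi2 (dvd_trans (Nat.minFac_dvd i) hidvdk)
              exact ⟨hmfp, hmf2, by omega, hmfle, by omega⟩
      by_cases hc : 2 ≤ k ∧ pvTrigger k ≤ i
      · rw [if_pos (hiff.2 hc), if_pos hc]
      · rw [if_neg (fun h => hc (hiff.1 h)), if_neg hc]

theorem pvStepA_good (n i : Nat) (h2 : 2 ≤ i) (hin : i ≤ n) (st : List Nat × List Nat)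
    (H : pvGood n (i - 1) st) : pvGood n i (pvStepA n st i) := by
  obtain ⟨lp, pr⟩ := st
  obtain ⟨Hlen, Hpr, Hlp⟩ := H
  simp only at Hlen Hpr Hlp
  rw [show i - 1 - 1 = i - 2 from by omega] at Hpr
  have hMi2 : 2 ≤ i.minFac := (Nat.minFac_prime (by omega : i ≠ 1)).two_le
  have hlpi := Hlp i hin
  have hrange : List.range' 2 (i - 1) = List.range' 2 (i - 2) ++ [2 + (i - 2)] := by
    have : i - 1 = (i - 2) + 1 := by omega
    rw [this, List.range'_concat, one_mul]
  by_cases hz : lp[i]! = 0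
  · -- `lp[i] == 0` branch: i is prime
    have hp : Nat.Prime i := by
      by_contra hnp
      obtain ⟨_, _, _, hlt⟩ := pvComposite_facts i h2 hnp
      rw [if_pos ⟨h2, by unfold pvTrigger; rw [if_neg hnp]; omega⟩] at hlpi
      omega
    have hstep : pvStepA n (lp, pr) i = (pvInnerA n i (pr ++ [i]) (lp.set i i) 0, pr ++ [i]) := by
      unfold pvStepA; rw [if_pos hz]
    rw [hstep]
    apply pvStepA_key n i h2 hin _ _ (by rw [List.length_set]; exact Hlen)
    · rw [Hpr, hrange, List.filter_append]
      congr 1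
      simp [hp, show 2 + (i - 2) = i by omega]
    · rw [List.getElem!_eq_getElem?_getD, List.getElem?_set_self (by rw [Hlen]; omega), Option.getD_some,
          hp.minFac_eq]
    · intro k hk
      by_cases hki : k = i
      · subst hki
        rw [List.getElem!_eq_getElem?_getD, List.getElem?_set_self (by rw [Hlen]; omega), Option.getD_some,
            hp.minFac_eq, if_pos ⟨h2, Or.inr rfl⟩]
      · rw [List.getElem!_eq_getElem?_getD, List.getElem?_set_ne (fun h => hki h.symm),
            ← List.getElem!_eq_getElem?_getD, Hlp k hk]
        by_cases hc : 2 ≤ k ∧ pvTrigger k ≤ i - 1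
        · rw [if_pos hc, if_pos ⟨hc.1, Or.inl hc.2⟩]
        · rw [if_neg hc, if_neg (by rintro ⟨hk2, h | h⟩; exact hc ⟨hk2, h⟩; exact hki h)]
  · -- `lp[i] != 0` branch: i is composite
    have hnp : ¬ Nat.Prime i := by
      intro hp
      rw [if_neg (by
        rintro ⟨_, htr⟩
        unfold pvTrigger at htr
        rw [if_pos hp] at htr
        omega)] at hlpi
      exact hz hlpi
    obtain ⟨hq2, hqmul, hmf2, hqlt⟩ := pvComposite_facts i h2 hnp
    have htri : pvTrigger i = i / i.minFac := by unfold pvTrigger; rw [if_neg hnp]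
    have hstep : pvStepA n (lp, pr) i = (pvInnerA n i pr lp 0, pr) := by
      unfold pvStepA; rw [if_neg hz]
    rw [hstep]
    apply pvStepA_key n i h2 hin _ _ Hlen
    · rw [Hpr, hrange, List.filter_append]
      have : List.filter (fun m => decide (Nat.Prime m)) [2 + (i - 2)] = [] := by
        simp [show 2 + (i - 2) = i by omega, hnp]
      rw [this, List.append_nil]
    · rw [hlpi, if_pos ⟨h2, by rw [htri]; omega⟩]
    · intro k hk
      rw [Hlp k hk]
      by_cases hki : k = i
      · subst hki
        rw [if_pos ⟨h2, by rw [htri]; omega⟩, if_pos ⟨h2, Or.inr rfl⟩]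
      · by_cases hc : 2 ≤ k ∧ pvTrigger k ≤ i - 1
        · rw [if_pos hc, if_pos ⟨hc.1, Or.inl hc.2⟩]
        · rw [if_neg hc, if_neg (by rintro ⟨hk2, h | h⟩; exact hc ⟨hk2, h⟩; exact hki h)]

theorem pvFold_good (n : Nat) :
    ∀ m, 1 + m ≤ n ∨ m = 0 →
      pvGood n (1 + m) ((List.range' 2 m).foldl (pvStepA n) (List.replicate (n + 1) 0, [])) := by
  intro m
  induction m with
  | zero => intro _; exact pvGood_init n
  | succ m ih =>
    intro hm
    have hmn : 1 + (m + 1) ≤ n := by omega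
    rw [List.range'_concat, one_mul, List.foldl_append, List.foldl_cons, List.foldl_nil]
    have hgood := ih (by omega)
    have := pvStepA_good n (2 + m) (by omega) (by omega) _ (by
      have : 2 + m - 1 = 1 + m := by omega
      rw [this]
      exact hgood)
    rw [show 1 + (m + 1) = 2 + m from by omega]
    exact this

theorem pvPrimesA_eq_filter (n : Nat) :
    pvPrimesA n = 1 :: (List.range' 2 (n + 1 - 2)).filter (fun m => decide (Nat.Prime m)) := by
  unfold pvPrimesA
  congr 1
  rcases Nat.lt_or_ge n 2 with hn | hn
  · interval_cases n <;> rfl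
  · have h := pvFold_good n (n - 1) (by omega)
    have h1 : 1 + (n - 1) = n := by omega
    have h2 : n + 1 - 2 = n - 1 := by omega
    rw [h2]
    rw [h1] at h
    rw [h.2.1]

theorem pvPrimesB_trial_iff (i : Nat) (hi : 2 ≤ i) :
    (((List.range' 2 (i - 2)).all fun d => i % d != 0) = true) ↔ Nat.Prime i := by
  rw [List.all_eq_true]
  constructor
  · intro h
    rw [Nat.prime_def_lt]
    refine ⟨hi, ?_⟩
    intro m hm hdvd
    by_contra hne
    have hm2 : 2 ≤ m := by
      rcases Nat.eq_zero_or_pos m with h0 | h0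
      · subst h0; simp at hdvd; omega
      · omega
    have hmem : m ∈ List.range' 2 (i - 2) := List.mem_range'_1.2 ⟨hm2, by omega⟩
    have := h m hmem
    simp at this
    exact this (Nat.dvd_iff_mod_eq_zero.1 hdvd)
  · intro hp d hd
    have hd' := List.mem_range'_1.1 hd
    simp only [bne_iff_ne, ne_eq]
    intro hmod
    have : d ∣ i := Nat.dvd_iff_mod_eq_zero.2 hmod
    have := (Nat.prime_def_lt.1 hp).2 d (by omega) this
    omega

theorem pvPrimesB_eq_filter (n : Nat) :
    pvPrimesB n = 1 :: (List.range' 2 (n + 1 - 2)).filter (fun m => decide (Nat.Prime m)) := by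
  unfold pvPrimesB
  congr 1
  apply List.filter_congr
  intro i hi
  have h2 : 2 ≤ i := (List.mem_range'_1.1 hi).1
  rw [Bool.eq_iff_iff, pvPrimesB_trial_iff i h2]
  simp

theorem pvAny_swap (sieve : List Nat) (h1 : ∀ e ∈ sieve, 1 ≤ e) (n : Nat) (f : Nat → Nat → Bool) :
    (sieve.any fun e => (List.range' e (n - e)).any fun j => f e j)
      = (List.range' 1 (n - 1)).any fun j => sieve.any fun e => decide (e ≤ j) && f e j := by
  rw [Bool.eq_iff_iff]
  simp only [List.any_eq_true, List.mem_range'_1, Bool.and_eq_true, decide_eq_true_eq]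
  constructor
  · rintro ⟨e, he, j, ⟨hej, hjn⟩, hf⟩
    have := h1 e he
    exact ⟨j, by omega, e, he, by omega, hf⟩
  · rintro ⟨j, hj, e, he, hej, hf⟩
    have := h1 e he
    exact ⟨e, he, j, by omega, hf⟩

-- ===== VERDICT (by name: the statement is the Claim_ definition above) =====
theorem check_spec : Claim_equal_check := by
  intro source sub_str _
  unfold Spec_check check check_alt
  split_ifs
  · rfl
  · rfl
  · rw [pvPrimesA_eq_filter, ← pvPrimesB_eq_filter]
    exact pvAny_swap _ (by
      intro e he
      rcases List.mem_cons.1 he with rfl | he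
      · exact le_refl 1
      · have := (List.mem_filter.1 he).1
        have := (List.mem_range'_1.1 this).1
        omega) _ _
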